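-- pv_equiv track=rewrite | github.com/nitodeco/deep-privacy | src/services/db.py | normalize_service_name
-- ===== SOURCE A (Python) =====
-- def normalize_service_name(service: str) -> str:
--     normalized = "".join(c if c.isalnum() else "_" for c in service.lower())
--
--     while "__" in normalized:
--         normalized = normalized.replace("__", "_")
--
--     normalized = normalized.strip("_")
--
--     if len(normalized) < 3:
--         normalized = normalized + "_" * (3 - len(normalized))
--
--     normalized = normalized[:63]
--
--     return normalized
-- ===== SOURCE B (Python) =====
-- def normalize_service_name(service: str) -> str:
--     # one pass: map, collapse runs of '_' and drop leading '_' while emitting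
--     out = []
--     for c in service.lower():
--         if c.isalnum():
--             out.append(c)
--         elif out and out[-1] != "_":
--             out.append("_")
--     if out and out[-1] == "_":
--         out.pop()
--     out += "_" * (3 - len(out))
--     return "".join(out[:63])
-- ===== Notes on version B (the rewrite author's own statement) =====
-- stated objective: simpler
-- what changed: B fuses A's three passes (character mapping, the repeated replace loop that collapses runs of underscores, and the strip of edge underscores) into a single left-to-right pass with an output accumulator.
import Mathlib
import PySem

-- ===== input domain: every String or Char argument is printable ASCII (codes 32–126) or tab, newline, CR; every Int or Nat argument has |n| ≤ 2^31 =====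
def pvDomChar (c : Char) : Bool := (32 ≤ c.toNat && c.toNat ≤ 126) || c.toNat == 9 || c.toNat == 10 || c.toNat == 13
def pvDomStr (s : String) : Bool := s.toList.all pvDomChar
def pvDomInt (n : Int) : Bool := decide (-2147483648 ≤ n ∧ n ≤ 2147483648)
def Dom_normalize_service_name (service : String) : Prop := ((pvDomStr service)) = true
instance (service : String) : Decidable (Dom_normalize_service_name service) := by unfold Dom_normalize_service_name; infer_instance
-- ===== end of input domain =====

-- B fuses A's map pass, its repeated-replace collapse loop and the strip of edge
-- underscores into one left-to-right pass with an output accumulator (objective: simpler).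

-- ===== PORT A =====
-- model of one replace(s, "__", "_") pass, used only to justify termination of the while loop
def nsnRep : List Char → List Char
  | [] => []
  | [c] => [c]
  | a :: b :: t => if a = '_' ∧ b = '_' then '_' :: nsnRep t else a :: nsnRep (b :: t)

theorem nsnRep_length_le (l : List Char) : (nsnRep l).length ≤ l.length := by
  fun_induction nsnRep l with
  | case1 => simp
  | case2 => simp
  | case3 a b t h ih => simp [h]; omega
  | case4 a b t h ih => simp [h] at *; omega

theorem nsnRep_length_lt (l : List Char) (h : ['_', '_'] <:+: l) :
    (nsnRep l).length < l.length := by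
  fun_induction nsnRep l with
  | case1 => simp at h
  | case2 c =>
    exfalso
    rcases h with ⟨p, q, hpq⟩
    have := congrArg List.length hpq
    simp at this
    omega
  | case3 a b t hab ih =>
    have := nsnRep_length_le t
    simp [hab]
    omega
  | case4 a b t hab ih =>
    have hmem : ['_', '_'] <:+: b :: t := by
      rcases (List.infix_cons_iff.mp h) with hp | hi
      · exfalso
        rcases hp with ⟨r, hr⟩
        cases hr
        exact hab ⟨rfl, rfl⟩
      · exact hi
    have := ih hmem
    simp [hab] at *
    omega

theorem nsn_replace_go_eq (fuel : Nat) (l acc : List Char) (h : l.length ≤ fuel) :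
    PySem.Chars.replace.go ['_', '_'] ['_'] fuel l acc = acc.reverse ++ nsnRep l := by
  induction fuel generalizing l acc with
  | zero =>
    have : l = [] := List.eq_nil_of_length_eq_zero (Nat.le_zero.mp h)
    subst this
    simp [PySem.Chars.replace.go, nsnRep]
  | succ n ih =>
    match l with
    | [] => simp [PySem.Chars.replace.go, nsnRep]
    | c :: t =>
      rw [PySem.Chars.replace.go]
      by_cases hp : List.isPrefixOf ['_', '_'] (c :: t) = true
      · rw [if_pos hp]
        match t, hp with
        | [], hp => simp [List.isPrefixOf] at hp
        | b :: t', hp =>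
          have hb : c = '_' ∧ b = '_' := by
            have := by simpa [List.isPrefixOf] using hp
            exact ⟨this.1.symm, this.2.symm⟩
          obtain ⟨rfl, rfl⟩ := hb
          simp at h
          simp only [List.length_cons, List.length_nil, List.drop_succ_cons, List.drop_zero]
          rw [ih t' _ (by omega)]
          simp [nsnRep]
      · rw [if_neg hp]
        simp at h
        rw [ih t _ (by omega)]
        match t with
        | [] => simp [nsnRep]
        | b :: t' =>
          have : ¬ (c = '_' ∧ b = '_') := by
            rintro ⟨rfl, rfl⟩
            simp [List.isPrefixOf] at hp
          simp [nsnRep, this]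

theorem nsn_replace_eq (l : List Char) :
    PySem.Chars.replace l ['_', '_'] ['_'] = nsnRep l := by
  rw [PySem.Chars.replace]
  simp
  exact nsn_replace_go_eq l.length l [] (le_refl _)

-- the 'while "__" in normalized: normalized = normalized.replace("__", "_")' loop
def nsnWhile (s : String) : String :=
  if PySem.Str.isIn "__" s then nsnWhile (PySem.Str.replace s "__" "_") else s
termination_by s.toList.length
decreasing_by
  rename_i h
  have hin : ("__".toList) <:+: s.toList := (PySem.Str.isIn_iff_infix "__" s).mp h
  have : (PySem.Str.replace s "__" "_").toList = nsnRep s.toList := by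
    rw [PySem.Str.toList_replace]
    exact nsn_replace_eq s.toList
  rw [this]
  exact nsnRep_length_lt s.toList hin

def normalize_service_name (service : String) : String :=
  -- "".join(c if c.isalnum() else "_" for c in service.lower()), built char by char
  let normalized := String.ofList ((PySem.Str.lower service).toList.map
    (fun c => if PySem.Chars.isalnum c then c else '_'))
  let normalized := nsnWhile normalized
  let normalized := PySem.Str.stripChars normalized "_"
  -- normalized + "_" * (3 - len(normalized)) when len < 3
  let normalized := if PySem.Str.len normalized < 3 then
      String.ofList (normalized.toList ++ List.replicate (3 - normalized.toList.length) '_')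
    else normalized
  PySem.Str.slice normalized none (some 63)

-- ===== PORT B =====
def nsnStep (out : List Char) (c : Char) : List Char :=
  if PySem.Chars.isalnum c then out ++ [c]
  else if out ≠ [] ∧ out.getLast? ≠ some '_' then out ++ ['_'] else out

def normalize_service_name_alt (service : String) : String :=
  let out := (PySem.Str.lower service).toList.foldl nsnStep []
  let out := if out ≠ [] ∧ out.getLast? = some '_' then out.dropLast else out
  let out := out ++ List.replicate (3 - out.length) '_'
  String.ofList (out.take 63)

-- ===== PRECONDITION & SPEC =====
def Spec_normalize_service_name (service : String) (out : String) : Prop := out = normalize_service_name_alt service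
instance (service : String) (out : String) : Decidable (Spec_normalize_service_name service out) := by unfold Spec_normalize_service_name; infer_instance

-- ===== CLAIM (what is proved, stated in full; the proofs are below) =====
def Claim_equal_normalize_service_name : Prop := ∀ (service : String), Dom_normalize_service_name service → Spec_normalize_service_name service (normalize_service_name service)

-- ===== LEMMAS AND PROOFS =====

-- the '_'-run-collapsed form of a list, recursing from the right
def nsnCollapse : List Char → List Char
  | [] => []
  | d :: t => if d = '_' ∧ (nsnCollapse t).head? = some '_' then nsnCollapse t else d :: nsnCollapse t

-- B's loop as a function of the mapped characters; the flag says "may emit '_'"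
def nsnH : Bool → List Char → List Char
  | _, [] => []
  | flag, d :: t => if d ≠ '_' then d :: nsnH true t else if flag then '_' :: nsnH false t else nsnH false t

theorem nsnCollapse_noDD (l : List Char) : ¬ (['_', '_'] <:+: nsnCollapse l) := by
  induction l with
  | nil => simp [nsnCollapse]
  | cons d t ih =>
    rw [nsnCollapse]
    split
    · exact ih
    · rename_i hcond
      intro hinf
      rcases List.infix_cons_iff.mp hinf with hp | hi
      · rcases hp with ⟨r, hr⟩
        have h1 : '_' :: ('_' :: r) = d :: nsnCollapse t := hr
        injection h1 with e1 e2
        exact hcond ⟨e1.symm, by rw [← e2]; rfl⟩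
      · exact ih hi

theorem nsnCollapse_fix (l : List Char) (h : ¬ (['_', '_'] <:+: l)) : nsnCollapse l = l := by
  induction l with
  | nil => simp [nsnCollapse]
  | cons d t ih =>
    have ht : nsnCollapse t = t := ih (fun hi => h (List.infix_cons hi))
    rw [nsnCollapse, ht]
    split
    · rename_i hcond
      exfalso
      obtain ⟨rfl, hh⟩ := hcond
      cases t with
      | nil => simp at hh
      | cons b t' =>
        have : b = '_' := by simpa using hh
        subst this
        exact h ⟨[], t', by simp⟩
    · rfl

theorem nsnCollapse_head_u (t : List Char) : (nsnCollapse ('_' :: t)).head? = some '_' := by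
  rw [nsnCollapse]
  split
  · rename_i hcond
    exact hcond.2
  · rfl

theorem nsnCollapse_rep (l : List Char) : nsnCollapse (nsnRep l) = nsnCollapse l := by
  fun_induction nsnRep l with
  | case1 => rfl
  | case2 c => rfl
  | case3 a b t hab ih =>
    obtain ⟨rfl, rfl⟩ := hab
    have h1 : nsnCollapse ('_' :: '_' :: t) = nsnCollapse ('_' :: t) := by
      conv_lhs => rw [nsnCollapse]
      rw [if_pos ⟨rfl, nsnCollapse_head_u t⟩]
    rw [h1]
    conv_lhs => rw [nsnCollapse]
    conv_rhs => rw [nsnCollapse]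
    rw [ih]
  | case4 a b t hab ih =>
    conv_lhs => rw [nsnCollapse]
    conv_rhs => rw [nsnCollapse]
    rw [ih]

theorem nsnWhile_eq (s : String) : (nsnWhile s).toList = nsnCollapse s.toList := by
  fun_induction nsnWhile s with
  | case1 s hin ih =>
    rw [ih, PySem.Str.toList_replace]
    have : PySem.Chars.replace s.toList "__".toList "_".toList = nsnRep s.toList := by
      have h1 : "__".toList = ['_', '_'] := by decide
      have h2 : "_".toList = ['_'] := by decide
      rw [h1, h2]
      exact nsn_replace_eq s.toList
    rw [this, nsnCollapse_rep]
  | case2 s hin =>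
    have : ¬ (['_', '_'] <:+: s.toList) := by
      intro hi
      apply hin
      rw [PySem.Str.isIn_iff_infix]
      simpa using hi
    exact (nsnCollapse_fix s.toList this).symm

theorem nsn_dropU_of_head (u : List Char) (h : u.head? ≠ some '_') :
    List.dropWhile (fun c => c == '_') u = u := by
  cases u with
  | nil => rfl
  | cons a r =>
    have : ¬ (a = '_') := fun e => h (by rw [e]; rfl)
    simp [this]

theorem nsn_head_u_structure (u : List Char) (hnd : ¬ (['_', '_'] <:+: u))
    (hh : u.head? = some '_') : ∃ rest, u = '_' :: rest ∧ rest.head? ≠ some '_' := by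
  cases u with
  | nil => simp at hh
  | cons a r =>
    have ha : a = '_' := by simpa using hh
    subst ha
    refine ⟨r, rfl, ?_⟩
    intro hr
    cases r with
    | nil => simp at hr
    | cons b r' =>
      have hb : b = '_' := by simpa using hr
      subst hb
      exact hnd ⟨[], r', by simp⟩

theorem nsnH_eq (l : List Char) :
    nsnH true l = nsnCollapse l ∧
    nsnH false l = List.dropWhile (fun c => c == '_') (nsnCollapse l) := by
  induction l with
  | nil => exact ⟨rfl, rfl⟩
  | cons d t ih =>
    obtain ⟨iht, ihf⟩ := ih
    by_cases hd : d = '_'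
    · subst hd
      by_cases hh : (nsnCollapse t).head? = some '_'
      · obtain ⟨rest, hre, hrh⟩ := nsn_head_u_structure _ (nsnCollapse_noDD t) hh
        have hc : nsnCollapse ('_' :: t) = nsnCollapse t := by
          conv_lhs => rw [nsnCollapse]
          rw [if_pos ⟨rfl, hh⟩]
        have hdw : List.dropWhile (fun c => c == '_') (nsnCollapse t) = rest := by
          rw [hre]
          simp only [List.dropWhile_cons]
          simp only [beq_self_eq_true, if_true]
          exact nsn_dropU_of_head rest hrh
        constructor
        · show (if ('_' : Char) ≠ '_' then ('_' : Char) :: nsnH true t else if true then '_' :: nsnH false t else nsnH false t) = nsnCollapse ('_' :: t)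
          simp only [ne_eq, not_true_eq_false, if_false, if_true]
          rw [ihf, hdw, hc, hre]
        · show (if ('_' : Char) ≠ '_' then ('_' : Char) :: nsnH true t else if false then '_' :: nsnH false t else nsnH false t) = List.dropWhile (fun c => c == '_') (nsnCollapse ('_' :: t))
          simp only [ne_eq, not_true_eq_false, if_false]
          rw [ihf, hc]
          simp
      · have hc : nsnCollapse ('_' :: t) = '_' :: nsnCollapse t := by
          conv_lhs => rw [nsnCollapse]
          rw [if_neg (fun hp => hh hp.2)]
        have hdw : List.dropWhile (fun c => c == '_') (nsnCollapse t) = nsnCollapse t :=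
          nsn_dropU_of_head _ hh
        constructor
        · show (if ('_' : Char) ≠ '_' then ('_' : Char) :: nsnH true t else if true then '_' :: nsnH false t else nsnH false t) = nsnCollapse ('_' :: t)
          simp only [ne_eq, not_true_eq_false, if_false, if_true]
          rw [ihf, hdw, hc]
        · show (if ('_' : Char) ≠ '_' then ('_' : Char) :: nsnH true t else if false then '_' :: nsnH false t else nsnH false t) = List.dropWhile (fun c => c == '_') (nsnCollapse ('_' :: t))
          simp only [ne_eq, not_true_eq_false, if_false]
          rw [ihf, hc]
          simp only [List.dropWhile_cons, beq_self_eq_true, if_true]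
          rw [hdw]
          simp
    · have hc : nsnCollapse (d :: t) = d :: nsnCollapse t := by
        conv_lhs => rw [nsnCollapse]
        rw [if_neg (fun hp => hd hp.1)]
      have hne : (d == '_') = false := by simpa using hd
      constructor
      · show (if d ≠ '_' then d :: nsnH true t else if true then '_' :: nsnH false t else nsnH false t) = nsnCollapse (d :: t)
        rw [if_pos hd, iht, hc]
      · show (if d ≠ '_' then d :: nsnH true t else if false then '_' :: nsnH false t else nsnH false t) = List.dropWhile (fun c => c == '_') (nsnCollapse (d :: t))
        rw [if_pos hd, hc]
        simp only [List.dropWhile_cons, hne]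
        rw [iht]
        simp

theorem nsn_foldl_eq (l : List Char) (acc : List Char) :
    l.foldl nsnStep acc =
      acc ++ nsnH (decide (acc ≠ [] ∧ acc.getLast? ≠ some '_'))
        (l.map (fun c => if PySem.Chars.isalnum c then c else '_')) := by
  induction l generalizing acc with
  | nil => simp [nsnH]
  | cons c t ih =>
    rw [List.foldl_cons, ih (nsnStep acc c), List.map_cons]
    by_cases ha : PySem.Chars.isalnum c = true
    · have hcu : ¬ (c = '_') := by
        rintro rfl
        have : PySem.Chars.isalnum '_' = false := by decide
        rw [this] at ha
        exact Bool.false_ne_true ha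
      have hstep : nsnStep acc c = acc ++ [c] := by rw [nsnStep, if_pos ha]
      have hflag : decide ((acc ++ [c]) ≠ [] ∧ (acc ++ [c]).getLast? ≠ some '_') = true := by
        simp
        exact hcu
      rw [hstep, hflag]
      have hmap : (if PySem.Chars.isalnum c then c else '_') = c := if_pos ha
      rw [hmap]
      show acc ++ [c] ++ nsnH true (t.map _) = acc ++ nsnH _ (c :: t.map _)
      have : nsnH (decide (acc ≠ [] ∧ acc.getLast? ≠ some '_')) (c :: t.map (fun c => if PySem.Chars.isalnum c then c else '_')) = c :: nsnH true (t.map (fun c => if PySem.Chars.isalnum c then c else '_')) := by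
        rw [nsnH, if_pos hcu]
      rw [this, List.append_assoc]
      rfl
    · have hmap : (if PySem.Chars.isalnum c then c else '_') = '_' := if_neg ha
      rw [hmap]
      have hstep : nsnStep acc c = if acc ≠ [] ∧ acc.getLast? ≠ some '_' then acc ++ ['_'] else acc := by
        rw [nsnStep, if_neg ha]
      by_cases hcond : acc ≠ [] ∧ acc.getLast? ≠ some '_'
      · have hflag : decide ((acc ++ ['_']) ≠ [] ∧ (acc ++ ['_']).getLast? ≠ some '_') = false := by
         simp
        rw [hstep, if_pos hcond, hflag]
        have : nsnH (decide (acc ≠ [] ∧ acc.getLast? ≠ some '_')) ('_' :: t.map (fun c => if PySem.Chars.isalnum c then c else '_')) = '_' :: nsnH false (t.map (fun c => if PySem.Chars.isalnum c then c else '_')) := by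
          rw [nsnH]
          simp only [ne_eq, not_true_eq_false, if_false]
          rw [decide_eq_true hcond, if_pos rfl]
        rw [this, List.append_assoc]
        rfl
      · rw [hstep, if_neg hcond]
        have : nsnH (decide (acc ≠ [] ∧ acc.getLast? ≠ some '_')) ('_' :: t.map (fun c => if PySem.Chars.isalnum c then c else '_')) = nsnH false (t.map (fun c => if PySem.Chars.isalnum c then c else '_')) := by
          rw [nsnH]
          simp only [ne_eq, not_true_eq_false, if_false]
          rw [decide_eq_false hcond, if_neg (by simp)]
        rw [this]
        congr 1
        congr 1
        exact decide_eq_false hcond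

theorem nsn_rstrip_eq (u : List Char) (h : ¬ (['_', '_'] <:+: u)) :
    (List.dropWhile (fun c => c == '_') u.reverse).reverse =
      if u ≠ [] ∧ u.getLast? = some '_' then u.dropLast else u := by
  rcases List.eq_nil_or_concat u with rfl | ⟨w, a, rfl⟩
  · simp
  · simp only [List.concat_eq_append] at h ⊢
    rw [List.reverse_concat]
    by_cases ha : a = '_'
    · subst ha
      simp only [List.dropWhile_cons, beq_self_eq_true, if_true]
      have hw : List.dropWhile (fun c => c == '_') w.reverse = w.reverse := by
        apply nsn_dropU_of_head
        intro hh
        rcases List.eq_nil_or_concat w with rfl | ⟨v, b, rfl⟩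
        · simp at hh
        · simp only [List.concat_eq_append] at hh ⊢
          rw [List.reverse_concat] at hh
          have hb : b = '_' := by simpa using hh
          subst hb
          exact h ⟨v, [], by simp⟩
      rw [hw, List.reverse_reverse]
      rw [if_pos ⟨by simp, by simp⟩]
      simp
    · have hne : (a == '_') = false := by simpa using ha
      simp only [List.dropWhile_cons, hne, Bool.false_eq_true, if_false]
      rw [List.reverse_cons, List.reverse_reverse]
      have hcond : ¬ ((w ++ [a]) ≠ [] ∧ (w ++ [a]).getLast? = some '_') := by
        rintro ⟨-, hlast⟩
        rw [List.getLast?_concat] at hlast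
        exact ha (by injection hlast)
      rw [if_neg hcond]

-- ===== VERDICT (by name: the statement is the Claim_ definition above) =====
theorem nsn_pad_take (b1 : List Char) (s : String) (hs : s.toList = b1) :
    (if PySem.Str.len s < 3 then
        String.ofList (s.toList ++ List.replicate (3 - s.toList.length) '_')
      else s).toList = b1 ++ List.replicate (3 - b1.length) '_' := by
  rw [PySem.Str.len_eq, hs]
  split
  · rename_i hlt
    rw [String.toList_ofList]
  · rename_i hge
    have h0 : 3 - b1.length = 0 := by omega
    rw [hs, h0, List.replicate_zero, List.append_nil]

theorem normalize_service_name_spec : Claim_equal_normalize_service_name := by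
  intro service _
  show normalize_service_name service = normalize_service_name_alt service
  have hndc := nsnCollapse_noDD ((PySem.Str.lower service).toList.map
    (fun c => if PySem.Chars.isalnum c then c else '_'))
  set m := (PySem.Str.lower service).toList.map
    (fun c => if PySem.Chars.isalnum c then c else '_') with hm
  set u := List.dropWhile (fun c => c == '_') (nsnCollapse m) with hu
  have hndu : ¬ (['_', '_'] <:+: u) :=
    fun hi => hndc (hi.trans (List.dropWhile_suffix _).isInfix)
  set b1 := if u ≠ [] ∧ u.getLast? = some '_' then u.dropLast else u with hb1
  -- B's side
  have hB : normalize_service_name_alt service =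
      String.ofList ((b1 ++ List.replicate (3 - b1.length) '_').take 63) := by
    simp only [normalize_service_name_alt]
    rw [nsn_foldl_eq]
    have hf : (decide ((([] : List Char)) ≠ [] ∧ ([] : List Char).getLast? ≠ some '_')) = false := by
      simp
    rw [hf, List.nil_append, ← hm, (nsnH_eq m).2, ← hu, ← hb1]
  -- A's side: the stripped core is b1
  have h3 : (PySem.Str.stripChars (nsnWhile (String.ofList m)) "_").toList = b1 := by
    rw [PySem.Str.toList_stripChars, nsnWhile_eq, String.toList_ofList]
    simp only [PySem.Chars.stripChars]
    have hp : (fun c => List.contains ("_".toList) c) = (fun c : Char => c == '_') := by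
      funext c
      by_cases hc : c = '_' <;> simp [hc]
    rw [hp, ← hu]
    exact nsn_rstrip_eq u hndu
  have hA : (normalize_service_name service).toList =
      (b1 ++ List.replicate (3 - b1.length) '_').take 63 := by
    simp only [normalize_service_name]
    rw [PySem.Str.toList_slice, PySem.Chars.slice_eq_listSlice,
      PySem.List.slice_to _ (by norm_num : (0 : Int) ≤ 63)]
    rw [← hm]
    rw [nsn_pad_take b1 _ h3]
    rfl
  rw [hB, ← hA, String.ofList_toList]
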